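-- pv_equiv track=rewrite | github.com/OpenDCAI/Mycel | core/tools/command/hooks/dangerous_commands.py | _unquoted_command
-- ===== SOURCE A (Python) =====
-- def _unquoted_command(command: str) -> str:
--     # @@@bash-hook-unquoted-scan - dangerous regexes should only inspect executable shell surface,
--     # not literal text inside quotes.
--     pieces: list[str] = []
--     in_single = False
--     in_double = False
--     escaped = False
--
--     for char in command:
--         if escaped:
--             if not in_single and not in_double:
--                 pieces.append(char)
--             escaped = False
--             continue
--
--         if char == "\\" and not in_single:
--             if not in_double:
--                 pieces.append(char)
--             escaped = True
--             continue
--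
--         if char == "'" and not in_double:
--             in_single = not in_single
--             continue
--
--         if char == '"' and not in_single:
--             in_double = not in_double
--             continue
--
--         if not in_single and not in_double and char == "#":
--             prev = pieces[-1] if pieces else ""
--             if not prev or prev.isspace():
--                 break
--
--         if not in_single and not in_double:
--             pieces.append(char)
--
--     return "".join(pieces)
-- ===== SOURCE B (Python) =====
-- def _unquoted_command(command: str) -> str:
--     # Index-based scanner: quoted regions are consumed by inner skip loops,
--     # escapes are handled by consuming two characters at once.
--     out = []
--     n = len(command)
--     i = 0
--     while i < n:
--         c = command[i]
--         if c == "'":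
--             i += 1
--             while i < n and command[i] != "'":
--                 i += 1
--             i += 1  # skip closing quote (or run past end)
--         elif c == '"':
--             i += 1
--             while i < n and command[i] != '"':
--                 i += 2 if command[i] == "\\" else 1
--             i += 1
--         elif c == "\\":
--             out.append(c)
--             if i + 1 < n:
--                 out.append(command[i + 1])
--             i += 2
--         elif c == "#":
--             if not out or out[-1].isspace():
--                 break
--             out.append(c)
--             i += 1
--         else:
--             out.append(c)
--             i += 1
--     return "".join(out)
-- ===== Notes on version B (the rewrite author's own statement) =====
-- stated objective: simpler
-- what changed: Replaces A's per-character state machine with three booleans (in_single, in_double, escaped) by an index-based scanner whose inner skip loops consume a whole quoted region or escape pair at once, so the main loop only ever sees unquoted executable text.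
import Mathlib
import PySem

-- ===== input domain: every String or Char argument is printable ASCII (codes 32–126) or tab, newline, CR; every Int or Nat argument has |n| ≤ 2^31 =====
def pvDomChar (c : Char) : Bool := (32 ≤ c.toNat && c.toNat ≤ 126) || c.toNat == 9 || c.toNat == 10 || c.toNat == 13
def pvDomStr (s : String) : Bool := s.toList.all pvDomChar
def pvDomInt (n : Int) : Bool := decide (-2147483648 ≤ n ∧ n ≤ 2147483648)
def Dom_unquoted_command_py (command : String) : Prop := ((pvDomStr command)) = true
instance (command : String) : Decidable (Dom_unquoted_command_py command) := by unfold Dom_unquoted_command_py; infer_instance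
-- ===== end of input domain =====

-- B replaces A's per-character five-boolean state machine by a scanner whose inner skip loops
-- consume whole quoted regions and escape pairs at once (objective: simpler decomposition).

-- shared helper: Python's `not prev or prev.isspace()` where prev is the last appended char (both Pythons do this test)
def pvLastBlank (pieces : List Char) : Bool :=
  match pieces.getLast? with
  | none => true
  | some p => PySem.Chars.isspace p

-- ===== PORT A =====
def aLoop : List Char → List Char → Bool → Bool → Bool → List Char
  | [], pieces, _, _, _ => pieces
  | c :: rest, pieces, insS, insD, esc =>
    if esc then
      aLoop rest (if !insS && !insD then pieces ++ [c] else pieces) insS insD false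
    else if c == '\\' && !insS then
      aLoop rest (if !insD then pieces ++ [c] else pieces) insS insD true
    else if c == '\'' && !insD then
      aLoop rest pieces (!insS) insD esc
    else if c == '"' && !insS then
      aLoop rest pieces insS (!insD) esc
    else if !insS && !insD && c == '#' && pvLastBlank pieces then
      pieces  -- break
    else if !insS && !insD then
      aLoop rest (pieces ++ [c]) insS insD esc
    else
      aLoop rest pieces insS insD esc

def unquoted_command_py (command : String) : String :=
  String.ofList (aLoop command.toList [] false false false)

-- ===== PORT B =====
-- inner loop: skip to (and past) the closing single quote
def bSkipSingle : List Char → List Char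
  | [] => []
  | c :: r => if c == '\'' then r else bSkipSingle r

-- inner loop: skip to (and past) the closing double quote, a backslash consuming two chars
def bSkipDouble : List Char → List Char
  | [] => []
  | c :: r =>
    if c == '"' then r
    else if c == '\\' then
      match r with
      | [] => []
      | _ :: r' => bSkipDouble r'
    else bSkipDouble r

-- termination facts cited by bLoop's decreasing_by
theorem bSkipSingle_len_le (l : List Char) : (bSkipSingle l).length ≤ l.length := by
  induction l with
  | nil => simp [bSkipSingle]
  | cons c r ih =>
    rw [bSkipSingle.eq_def]
    by_cases h : c = '\''
    · simp [h]
    · simp [h]; omega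

theorem bSkipDouble_len_le (l : List Char) : (bSkipDouble l).length ≤ l.length := by
  induction l using bSkipDouble.induct with
  | case1 => simp [bSkipDouble]
  | case2 c r h => simp only [beq_iff_eq] at h; subst h; simp [bSkipDouble.eq_def]
  | case3 c h1 h2 =>
    simp only [beq_iff_eq] at h1 h2; subst h2; simp [bSkipDouble.eq_def]
  | case4 c h1 h2 d r ih =>
    simp only [beq_iff_eq] at h1 h2; subst h2
    rw [bSkipDouble.eq_def]; simp; omega
  | case5 c r h1 h2 ih =>
    simp only [beq_iff_eq] at h1 h2
    rw [bSkipDouble.eq_def]; simp [h1, h2]; omega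

def bLoop : List Char → List Char → List Char
  | [], out => out
  | c :: r, out =>
    if c == '\'' then bLoop (bSkipSingle r) out
    else if c == '"' then bLoop (bSkipDouble r) out
    else if c == '\\' then
      match r with
      | [] => out ++ [c]
      | d :: r' => bLoop r' (out ++ [c, d])
    else if c == '#' then
      if pvLastBlank out then out else bLoop r (out ++ [c])
    else bLoop r (out ++ [c])
termination_by l _ => l.length
decreasing_by
  · have := bSkipSingle_len_le r; simp; omega
  · have := bSkipDouble_len_le r; simp; omega
  · simp
  · simp
  · simp

def unquoted_command_py_alt (command : String) : String :=
  String.ofList (bLoop command.toList [])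

-- ===== PRECONDITION & SPEC =====
def Spec_unquoted_command_py (command : String) (out : String) : Prop := out = unquoted_command_py_alt command
instance (command : String) (out : String) : Decidable (Spec_unquoted_command_py command out) := by unfold Spec_unquoted_command_py; infer_instance

-- ===== CLAIM (what is proved, stated in full; the proofs are below) =====
def Claim_equal_unquoted_command_py : Prop := ∀ (command : String), Dom_unquoted_command_py command → Spec_unquoted_command_py command (unquoted_command_py command)

-- ===== LEMMAS AND PROOFS =====

-- inside a single-quoted region A appends nothing and scans to the closing quote
theorem aLoop_single (cs p : List Char) :
    aLoop cs p true false false = aLoop (bSkipSingle cs) p false false false := by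
  induction cs with
  | nil => simp [aLoop, bSkipSingle]
  | cons c r ih =>
    rw [bSkipSingle.eq_def]
    by_cases h : c = '\''
    · subst h; simp [aLoop]
    · simp [aLoop, h, ih]

-- inside a double-quoted region A appends nothing and a backslash consumes two chars
theorem aLoop_double (cs p : List Char) :
    aLoop cs p false true false = aLoop (bSkipDouble cs) p false false false := by
  induction cs using bSkipDouble.induct with
  | case1 => simp [aLoop, bSkipDouble]
  | case2 c r h => simp only [beq_iff_eq] at h; subst h; simp [aLoop, bSkipDouble.eq_def]
  | case3 c h1 h2 =>
    simp only [beq_iff_eq] at h1 h2; subst h2; simp [aLoop, bSkipDouble.eq_def]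
  | case4 c h1 h2 d r ih =>
    simp only [beq_iff_eq] at h1 h2; subst h2
    rw [bSkipDouble.eq_def]; simp [aLoop, ih]
  | case5 c r h1 h2 ih =>
    simp only [beq_iff_eq] at h1 h2
    rw [bSkipDouble.eq_def]; simp [aLoop, h1, h2, ih]

-- the main invariant: outside quotes, with the escape flag down, A's machine equals B's scanner
theorem aLoop_eq_bLoop (cs out : List Char) : aLoop cs out false false false = bLoop cs out := by
  induction cs, out using bLoop.induct with
  | case1 out => simp [aLoop, bLoop]
  | case2 c r out h ih =>
    simp only [beq_iff_eq] at h; subst h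
    rw [bLoop.eq_def]; simp [aLoop, aLoop_single, ih]
  | case3 c r out h1 h2 ih =>
    simp only [beq_iff_eq] at h2; subst h2
    rw [bLoop.eq_def]; simp [aLoop, aLoop_double, ih]
  | case4 c out h1 h2 h3 =>
    simp only [beq_iff_eq] at h3; subst h3
    rw [bLoop.eq_def]; simp [aLoop]
  | case5 c out h1 h2 h3 d r ih =>
    simp only [beq_iff_eq] at h3; subst h3
    rw [bLoop.eq_def]; simp [aLoop, ih]
  | case6 c r out h1 h2 h3 h4 h5 =>
    simp only [beq_iff_eq] at h4; subst h4
    rw [bLoop.eq_def]; simp [aLoop, h5]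
  | case7 c r out h1 h2 h3 h4 h5 ih =>
    simp only [beq_iff_eq] at h4; subst h4
    rw [bLoop.eq_def]; simp [aLoop, h5, ih]
  | case8 c r out h1 h2 h3 h4 ih =>
    simp only [beq_iff_eq] at h1 h2 h3 h4
    rw [bLoop.eq_def]; simp [aLoop, h1, h2, h3, h4, ih]

-- ===== VERDICT (by name: the statement is the Claim_ definition above) =====
theorem unquoted_command_py_spec : Claim_equal_unquoted_command_py := by
  intro command _
  unfold Spec_unquoted_command_py unquoted_command_py unquoted_command_py_alt
  rw [aLoop_eq_bLoop]
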